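-- pv_equiv track=rewrite | github.com/lmgame-org/GamingAgent | games/tetris/workers.py | overlay_block_on_grid_with_pivot
-- ===== SOURCE A (Python) =====
-- def overlay_block_on_grid_with_pivot(base_grid, block, block_pivot, target_pivot):
--     """
--     Overlay the block (2D list) onto a copy of the base_grid such that the block's pivot
--     (block_pivot) is mapped to target_pivot in the grid.
--     """
--     new_grid = [row.copy() for row in base_grid]
--     offset_r = target_pivot[0] - block_pivot[0]
--     offset_c = target_pivot[1] - block_pivot[1]
--     for i, row in enumerate(block):
--         for j, cell in enumerate(row):
--             if cell == 1:
--                 new_r = offset_r + i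
--                 new_c = offset_c + j
--                 if 0 <= new_r < len(new_grid) and 0 <= new_c < len(new_grid[0]):
--                     new_grid[new_r][new_c] = "1"
--     return new_grid
-- ===== SOURCE B (Python) =====
-- def overlay_block_on_grid_with_pivot(base_grid, block, block_pivot, target_pivot):
--     """
--     Gather instead of scatter: for each grid cell (r, c) look up the block cell that maps
--     onto it (block[r - off_r][c - off_c]) and decide the cell value directly, instead of
--     iterating over the block and writing into a copied grid.
--     """
--     off_r = target_pivot[0] - block_pivot[0]
--     off_c = target_pivot[1] - block_pivot[1]
--     w0 = len(base_grid[0]) if base_grid else 0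
--     new_grid = []
--     for r, row in enumerate(base_grid):
--         i = r - off_r
--         brow = block[i] if 0 <= i < len(block) else []
--         new_grid.append(["1" if (c < w0 and 0 <= c - off_c < len(brow)
--                                  and brow[c - off_c] == 1) else v
--                          for c, v in enumerate(row)])
--     return new_grid
-- ===== Notes on version B (the rewrite author's own statement) =====
-- stated objective: alternative
-- what changed: Inverts A's scatter into a gather: instead of looping over block cells and writing '1' into a copied grid, B builds each output row by looking up, for every grid cell (r, c), the block cell block[r-off_r][c-off_c] that maps onto it and deciding the value directly.
import Mathlib
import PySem

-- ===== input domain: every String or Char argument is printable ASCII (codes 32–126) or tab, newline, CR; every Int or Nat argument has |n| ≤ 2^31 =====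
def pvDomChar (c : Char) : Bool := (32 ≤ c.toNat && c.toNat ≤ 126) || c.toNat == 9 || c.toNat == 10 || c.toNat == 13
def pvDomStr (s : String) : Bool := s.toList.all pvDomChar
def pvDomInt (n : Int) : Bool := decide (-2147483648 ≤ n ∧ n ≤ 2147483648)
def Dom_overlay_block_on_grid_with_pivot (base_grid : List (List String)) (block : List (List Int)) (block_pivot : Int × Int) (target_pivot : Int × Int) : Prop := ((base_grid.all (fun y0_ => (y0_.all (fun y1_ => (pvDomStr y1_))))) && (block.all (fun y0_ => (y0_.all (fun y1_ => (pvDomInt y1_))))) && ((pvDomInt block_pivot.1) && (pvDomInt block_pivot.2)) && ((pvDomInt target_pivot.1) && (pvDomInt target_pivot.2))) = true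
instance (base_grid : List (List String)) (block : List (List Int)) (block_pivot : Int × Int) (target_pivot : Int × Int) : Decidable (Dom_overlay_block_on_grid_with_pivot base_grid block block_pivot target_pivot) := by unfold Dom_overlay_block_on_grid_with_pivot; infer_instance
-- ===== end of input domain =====

-- B replaces A's scatter (loop over block cells, writing "1" into a copied grid) by a gather:
-- for each grid cell it looks up the block cell mapping onto it and decides the value directly;
-- objective: alternative traversal, same cost.

-- ===== PORT A =====
def overlay_block_on_grid_with_pivot (base_grid : List (List String)) (block : List (List Int)) (block_pivot : Int × Int) (target_pivot : Int × Int) : List (List String) :=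
  let new_grid := base_grid.map (fun row => row)
  let offset_r := target_pivot.1 - block_pivot.1
  let offset_c := target_pivot.2 - block_pivot.2
  (PySem.List.enumerate block 0).foldl (fun g p =>
    (PySem.List.enumerate p.2 0).foldl (fun g q =>
      if q.2 = 1 then
        let new_r := offset_r + p.1
        let new_c := offset_c + q.1
        if 0 ≤ new_r ∧ new_r < PySem.List.len g ∧ 0 ≤ new_c ∧ new_c < PySem.List.len (g.headD []) then
          PySem.List.pySetD g new_r (PySem.List.pySetD (PySem.List.pyGetD g new_r []) new_c "1")
        else g
      else g) g) new_grid

-- ===== PORT B =====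
def overlay_block_on_grid_with_pivot_alt (base_grid : List (List String)) (block : List (List Int)) (block_pivot : Int × Int) (target_pivot : Int × Int) : List (List String) :=
  let off_r := target_pivot.1 - block_pivot.1
  let off_c := target_pivot.2 - block_pivot.2
  let w0 := if base_grid ≠ [] then PySem.List.len (base_grid.headD []) else 0
  (PySem.List.enumerate base_grid 0).foldl (fun new_grid rrow =>
    let i := rrow.1 - off_r
    let brow := if 0 ≤ i ∧ i < PySem.List.len block then PySem.List.pyGetD block i [] else []
    new_grid ++ [(PySem.List.enumerate rrow.2 0).map (fun cv =>
      if cv.1 < w0 ∧ 0 ≤ cv.1 - off_c ∧ cv.1 - off_c < PySem.List.len brow ∧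
          PySem.List.pyGetD brow (cv.1 - off_c) 0 = 1 then "1" else cv.2)]) []

-- ===== PRECONDITION & SPEC =====
-- Pre_ excludes exactly the inputs where Python A raises IndexError: a block cell 1 lands at
-- (r, c) with r in range and c below the FIRST row's length but at or beyond row r's own length
-- (a ragged grid); on those inputs A returns no value, B simply leaves the short row unchanged.
def Pre_overlay_block_on_grid_with_pivot (base_grid : List (List String)) (block : List (List Int)) (block_pivot : Int × Int) (target_pivot : Int × Int) : Prop :=
  ∀ p ∈ PySem.List.enumerate block 0, ∀ q ∈ PySem.List.enumerate p.2 0, q.2 = 1 →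
    (0 ≤ target_pivot.1 - block_pivot.1 + p.1 ∧ target_pivot.1 - block_pivot.1 + p.1 < PySem.List.len base_grid ∧
     0 ≤ target_pivot.2 - block_pivot.2 + q.1 ∧ target_pivot.2 - block_pivot.2 + q.1 < PySem.List.len (base_grid.headD [])) →
    target_pivot.2 - block_pivot.2 + q.1 < PySem.List.len (base_grid.getD (target_pivot.1 - block_pivot.1 + p.1).toNat [])
instance (base_grid : List (List String)) (block : List (List Int)) (block_pivot : Int × Int) (target_pivot : Int × Int) : Decidable (Pre_overlay_block_on_grid_with_pivot base_grid block block_pivot target_pivot) := by unfold Pre_overlay_block_on_grid_with_pivot; infer_instance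

def pvWitness_overlay_block_on_grid_with_pivot : List (List String) × List (List Int) × (Int × Int) × (Int × Int) :=
  ([["0", "0"], ["0", "0"]], [[1, 0], [0, 1]], (0, 0), (1, 0))

def Spec_overlay_block_on_grid_with_pivot (base_grid : List (List String)) (block : List (List Int)) (block_pivot : Int × Int) (target_pivot : Int × Int) (out : List (List String)) : Prop := out = overlay_block_on_grid_with_pivot_alt base_grid block block_pivot target_pivot
instance (base_grid : List (List String)) (block : List (List Int)) (block_pivot : Int × Int) (target_pivot : Int × Int) (out : List (List String)) : Decidable (Spec_overlay_block_on_grid_with_pivot base_grid block block_pivot target_pivot out) := by unfold Spec_overlay_block_on_grid_with_pivot; infer_instance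

-- ===== CLAIM =====
def Claim_equal_overlay_block_on_grid_with_pivot : Prop := ∀ (base_grid : List (List String)) (block : List (List Int)) (block_pivot : Int × Int) (target_pivot : Int × Int), Dom_overlay_block_on_grid_with_pivot base_grid block block_pivot target_pivot → Pre_overlay_block_on_grid_with_pivot base_grid block block_pivot target_pivot → Spec_overlay_block_on_grid_with_pivot base_grid block block_pivot target_pivot (overlay_block_on_grid_with_pivot base_grid block block_pivot target_pivot)

-- ===== LEMMAS AND PROOFS =====

-- the grid obtained by painting "1" on every coordinate of a set s, used to describe both ports
def pvMarkRow (s : PySem.Set (Int × Int)) (r : Int) (row : List String) : List String :=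
  (PySem.List.enumerate row 0).map (fun cv => if PySem.Set.contains s (r, cv.1) then "1" else cv.2)

def pvRebuild (base : List (List String)) (s : PySem.Set (Int × Int)) : List (List String) :=
  (PySem.List.enumerate base 0).map (fun rrow => pvMarkRow s rrow.1 rrow.2)

theorem pvMarkRow_getElem? (s : PySem.Set (Int × Int)) (r : Int) (row : List String) (c : Nat) :
    (pvMarkRow s r row)[c]? = row[c]?.map (fun v => if PySem.Set.contains s (r, (c : Int)) then "1" else v) := by
  simp [pvMarkRow, PySem.List.getElem?_enumerate]
  cases row[c]? <;> rfl

theorem pvMarkRow_length (s : PySem.Set (Int × Int)) (r : Int) (row : List String) :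
    (pvMarkRow s r row).length = row.length := by
  simp [pvMarkRow, PySem.List.length_enumerate]

theorem pvRebuild_getElem? (base : List (List String)) (s : PySem.Set (Int × Int)) (k : Nat) :
    (pvRebuild base s)[k]? = base[k]?.map (fun row => pvMarkRow s (k : Int) row) := by
  simp [pvRebuild, PySem.List.getElem?_enumerate]
  cases base[k]? <;> rfl

theorem pvRebuild_length (base : List (List String)) (s : PySem.Set (Int × Int)) :
    (pvRebuild base s).length = base.length := by
  simp [pvRebuild, PySem.List.length_enumerate]

theorem pvMarkRow_add_row_ne (s : PySem.Set (Int × Int)) (r r' c : Int) (row : List String)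
    (h : r' ≠ r) : pvMarkRow (PySem.Set.add s (r, c)) r' row = pvMarkRow s r' row := by
  apply List.ext_getElem?
  intro n
  simp only [pvMarkRow_getElem?, PySem.Set.contains_iff, PySem.Set.mem_add]
  cases row[n]? <;> simp [Prod.ext_iff, h]

theorem pvMarkRow_set (s : PySem.Set (Int × Int)) (r c : Int) (hc : 0 ≤ c) (row : List String) :
    (pvMarkRow s r row).set c.toNat "1" = pvMarkRow (PySem.Set.add s (r, c)) r row := by
  apply List.ext_getElem?
  intro n
  rw [List.getElem?_set]
  by_cases hn : c.toNat = n
  · subst hn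
    rw [if_pos rfl]
    by_cases hlt : c.toNat < row.length
    · rw [if_pos (by rw [pvMarkRow_length]; exact hlt), pvMarkRow_getElem?,
        List.getElem?_eq_getElem hlt]
      have hcc : ((c.toNat : Int)) = c := Int.toNat_of_nonneg hc
      simp [PySem.Set.mem_add, hcc]
    · rw [if_neg (by rw [pvMarkRow_length]; exact hlt), pvMarkRow_getElem?,
        List.getElem?_eq_none (by omega : row.length ≤ c.toNat)]
      rfl
  · rw [if_neg hn, pvMarkRow_getElem?, pvMarkRow_getElem?]
    have hne : ((n : Int)) ≠ c := by omega
    cases row[n]? <;> simp [PySem.Set.mem_add, Prod.ext_iff, hne]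

theorem pvSetCell_rebuild (base : List (List String)) (s : PySem.Set (Int × Int)) (r c : Int)
    (hr : 0 ≤ r) (hc : 0 ≤ c) :
    PySem.List.pySetD (pvRebuild base s) r
      (PySem.List.pySetD (PySem.List.pyGetD (pvRebuild base s) r []) c "1")
      = pvRebuild base (PySem.Set.add s (r, c)) := by
  rw [PySem.List.pySetD_of_nonneg _ _ hr]
  apply List.ext_getElem?
  intro k
  rw [List.getElem?_set]
  by_cases hk : r.toNat = k
  · subst hk
    rw [if_pos rfl]
    by_cases hlt : r.toNat < (pvRebuild base s).length
    · have hlt' : r.toNat < base.length := by rwa [pvRebuild_length] at hlt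
      rw [if_pos hlt]
      rw [PySem.List.pyGetD_eq_getElem _ _ hr (by
        simp only [pvRebuild_length]; omega)]
      have hget : (pvRebuild base s)[r.toNat] = pvMarkRow s (r.toNat : Int) base[r.toNat] := by
        have h := pvRebuild_getElem? base s r.toNat
        rw [List.getElem?_eq_getElem hlt, List.getElem?_eq_getElem hlt'] at h
        exact Option.some_injective _ h
      rw [hget, PySem.List.pySetD_of_nonneg _ _ hc, pvMarkRow_set s _ c hc,
        pvRebuild_getElem?, List.getElem?_eq_getElem hlt', Int.toNat_of_nonneg hr]
      rfl
    · have hlt' : ¬ r.toNat < base.length := by rwa [pvRebuild_length] at hlt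
      rw [if_neg hlt, pvRebuild_getElem?,
        List.getElem?_eq_none (by omega : base.length ≤ r.toNat)]
      rfl
  · rw [if_neg hk, pvRebuild_getElem?, pvRebuild_getElem?]
    have hne : ((k : Int)) ≠ r := by omega
    cases base[k]? <;> simp [pvMarkRow_add_row_ne s r _ c _ hne]

theorem pvRebuild_head_len (base : List (List String)) (s : PySem.Set (Int × Int)) :
    PySem.List.len ((pvRebuild base s).headD []) =
      (if base ≠ [] then PySem.List.len (base.headD []) else 0) := by
  cases base with
  | nil => simp [pvRebuild, PySem.List.enumerate_nil]
  | cons b bs =>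
    simp [pvRebuild, PySem.List.enumerate_cons, PySem.List.len_eq, pvMarkRow_length]

theorem pvRebuild_len (base : List (List String)) (s : PySem.Set (Int × Int)) :
    PySem.List.len (pvRebuild base s) = PySem.List.len base := by
  simp [pvRebuild_length]

theorem pvInner (base : List (List String)) (r offc : Int) (M : List (Int × Int))
    (s : PySem.Set (Int × Int)) :
    M.foldl (fun g q =>
      if q.2 = 1 then
        if 0 ≤ r ∧ r < PySem.List.len g ∧ 0 ≤ offc + q.1 ∧ offc + q.1 < PySem.List.len (g.headD []) then
          PySem.List.pySetD g r (PySem.List.pySetD (PySem.List.pyGetD g r []) (offc + q.1) "1")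
        else g
      else g) (pvRebuild base s)
    = pvRebuild base (M.foldl (fun s q =>
      if q.2 = 1 then
        if 0 ≤ r ∧ r < PySem.List.len base ∧ 0 ≤ offc + q.1 ∧
            offc + q.1 < (if base ≠ [] then PySem.List.len (base.headD []) else 0) then
          PySem.Set.add s (r, offc + q.1)
        else s
      else s) s) := by
  induction M generalizing s with
  | nil => rfl
  | cons q M ih =>
    simp only [List.foldl_cons, pvRebuild_len, pvRebuild_head_len]
    by_cases h1 : q.2 = 1
    · simp only [if_pos h1]
      by_cases h2 : 0 ≤ r ∧ r < PySem.List.len base ∧ 0 ≤ offc + q.1 ∧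
          offc + q.1 < (if base ≠ [] then PySem.List.len (base.headD []) else 0)
      · rw [if_pos h2, if_pos h2, pvSetCell_rebuild base s r (offc + q.1) h2.1 h2.2.2.1, ih]
      · rw [if_neg h2, if_neg h2, ih]
    · simp only [if_neg h1, ih]

theorem pvOuter (base : List (List String)) (offr offc : Int) (L : List (Int × List Int))
    (s : PySem.Set (Int × Int)) :
    L.foldl (fun g p =>
      (PySem.List.enumerate p.2 0).foldl (fun g q =>
        if q.2 = 1 then
          if 0 ≤ offr + p.1 ∧ offr + p.1 < PySem.List.len g ∧ 0 ≤ offc + q.1 ∧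
              offc + q.1 < PySem.List.len (g.headD []) then
            PySem.List.pySetD g (offr + p.1)
              (PySem.List.pySetD (PySem.List.pyGetD g (offr + p.1) []) (offc + q.1) "1")
          else g
        else g) g) (pvRebuild base s)
    = pvRebuild base (L.foldl (fun s p =>
      (PySem.List.enumerate p.2 0).foldl (fun s q =>
        if q.2 = 1 then
          if 0 ≤ offr + p.1 ∧ offr + p.1 < PySem.List.len base ∧ 0 ≤ offc + q.1 ∧
              offc + q.1 < (if base ≠ [] then PySem.List.len (base.headD []) else 0) then
            PySem.Set.add s (offr + p.1, offc + q.1)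
          else s
        else s) s) s) := by
  induction L generalizing s with
  | nil => rfl
  | cons p L ih =>
    simp only [List.foldl_cons]
    rw [pvInner base (offr + p.1) offc (PySem.List.enumerate p.2 0) s, ih]

theorem pvRebuild_empty (base : List (List String)) : pvRebuild base PySem.Set.empty = base := by
  apply List.ext_getElem?
  intro k
  rw [pvRebuild_getElem?]
  cases base[k]? with
  | none => rfl
  | some row =>
    simp only [Option.map_some]
    congr 1
    apply List.ext_getElem?
    intro n
    rw [pvMarkRow_getElem?]
    cases row[n]? <;> simp [PySem.Set.empty]

-- membership in the set the scatter fold builds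
theorem pvMemInner (r offc n w : Int) (M : List (Int × Int)) (s : PySem.Set (Int × Int))
    (x : Int × Int) :
    (x ∈ M.foldl (fun s q =>
      if q.2 = 1 then
        if 0 ≤ r ∧ r < n ∧ 0 ≤ offc + q.1 ∧ offc + q.1 < w then
          PySem.Set.add s (r, offc + q.1)
        else s
      else s) s) ↔ x ∈ s ∨ ∃ q ∈ M, q.2 = 1 ∧ 0 ≤ r ∧ r < n ∧ 0 ≤ offc + q.1 ∧ offc + q.1 < w ∧
        x = (r, offc + q.1) := by
  induction M generalizing s with
  | nil => simp
  | cons q M ih =>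
    simp only [List.foldl_cons, List.mem_cons, ih]
    by_cases h1 : q.2 = 1
    · by_cases h2 : 0 ≤ r ∧ r < n ∧ 0 ≤ offc + q.1 ∧ offc + q.1 < w
      · rw [if_pos h1, if_pos h2]
        simp only [PySem.Set.mem_add]
        constructor
        · rintro ((h | h) | ⟨q', hq', hrest⟩)
          · exact Or.inl h
          · exact Or.inr ⟨q, Or.inl rfl, h1, h2.1, h2.2.1, h2.2.2.1, h2.2.2.2, h⟩
          · exact Or.inr ⟨q', Or.inr hq', hrest⟩
        · rintro (h | ⟨q', (rfl | hq'), h1', hr0, hrn, hc0, hcw, hx⟩)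
          · exact Or.inl (Or.inl h)
          · exact Or.inl (Or.inr hx)
          · exact Or.inr ⟨q', hq', h1', hr0, hrn, hc0, hcw, hx⟩
      · rw [if_pos h1, if_neg h2]
        constructor
        · rintro (h | ⟨q', hq', hrest⟩)
          · exact Or.inl h
          · exact Or.inr ⟨q', Or.inr hq', hrest⟩
        · rintro (h | ⟨q', (rfl | hq'), h1', hr0, hrn, hc0, hcw, hx⟩)
          · exact Or.inl h
          · exact absurd ⟨hr0, hrn, hc0, hcw⟩ h2
          · exact Or.inr ⟨q', hq', h1', hr0, hrn, hc0, hcw, hx⟩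
    · rw [if_neg h1]
      constructor
      · rintro (h | ⟨q', hq', hrest⟩)
        · exact Or.inl h
        · exact Or.inr ⟨q', Or.inr hq', hrest⟩
      · rintro (h | ⟨q', (rfl | hq'), h1', hrest⟩)
        · exact Or.inl h
        · exact absurd h1' h1
        · exact Or.inr ⟨q', hq', h1', hrest⟩

theorem pvMemOuter (offr offc n w : Int) (L : List (Int × List Int)) (s : PySem.Set (Int × Int))
    (x : Int × Int) :
    (x ∈ L.foldl (fun s p =>
      (PySem.List.enumerate p.2 0).foldl (fun s q =>
        if q.2 = 1 then
          if 0 ≤ offr + p.1 ∧ offr + p.1 < n ∧ 0 ≤ offc + q.1 ∧ offc + q.1 < w then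
            PySem.Set.add s (offr + p.1, offc + q.1)
          else s
        else s) s) s) ↔ x ∈ s ∨ ∃ p ∈ L, ∃ q ∈ PySem.List.enumerate p.2 0, q.2 = 1 ∧
        0 ≤ offr + p.1 ∧ offr + p.1 < n ∧ 0 ≤ offc + q.1 ∧ offc + q.1 < w ∧
        x = (offr + p.1, offc + q.1) := by
  induction L generalizing s with
  | nil => simp
  | cons p L ih =>
    simp only [List.foldl_cons, List.mem_cons, ih, pvMemInner]
    constructor
    · rintro ((h | ⟨q, hq, hrest⟩) | ⟨p', hp', hrest⟩)
      · exact Or.inl h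
      · exact Or.inr ⟨p, Or.inl rfl, q, hq, hrest⟩
      · exact Or.inr ⟨p', Or.inr hp', hrest⟩
    · rintro (h | ⟨p', (rfl | hp'), q, hq, hrest⟩)
      · exact Or.inl (Or.inl h)
      · exact Or.inl (Or.inr ⟨q, hq, hrest⟩)
      · exact Or.inr ⟨p', hp', q, hq, hrest⟩

-- B's foldl-append loop is the map over enumerate
theorem pvAltRows (base : List (List String)) (f : Int × List String → List String) :
    (PySem.List.enumerate base 0).foldl (fun g rrow => g ++ [f rrow]) []
      = (PySem.List.enumerate base 0).map f := by
  generalize PySem.List.enumerate base 0 = L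
  have h : ∀ (L : List (Int × List String)) (acc : List (List String)),
      L.foldl (fun g rrow => g ++ [f rrow]) acc = acc ++ L.map f := by
    intro L
    induction L with
    | nil => simp
    | cons a L ih => intro acc; simp [ih]
  simpa using h L []

-- the gather condition for cell (k, c) equals membership of (k, c) in the scatter set
theorem pvGatherEqMem (block : List (List Int)) (offr offc n w : Int) (k c : Nat)
    (hk : (k : Int) < n) :
    (((k : Int), (c : Int)) ∈ (PySem.List.enumerate block 0).foldl (fun s p =>
      (PySem.List.enumerate p.2 0).foldl (fun s q =>
        if q.2 = 1 then
          if 0 ≤ offr + p.1 ∧ offr + p.1 < n ∧ 0 ≤ offc + q.1 ∧ offc + q.1 < w then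
            PySem.Set.add s (offr + p.1, offc + q.1)
          else s
        else s) s) PySem.Set.empty)
    ↔ ((c : Int) < w ∧ 0 ≤ (c : Int) - offc ∧
        (c : Int) - offc < PySem.List.len (if 0 ≤ (k : Int) - offr ∧ (k : Int) - offr < PySem.List.len block
          then PySem.List.pyGetD block ((k : Int) - offr) [] else []) ∧
        PySem.List.pyGetD (if 0 ≤ (k : Int) - offr ∧ (k : Int) - offr < PySem.List.len block
          then PySem.List.pyGetD block ((k : Int) - offr) [] else []) ((c : Int) - offc) 0 = 1) := by
  rw [pvMemOuter]
  simp only [PySem.Set.empty, List.not_mem_nil, false_or]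
  constructor
  · rintro ⟨p, hp, q, hq, h1, hr0, hrn, hc0, hcw, hx⟩
    rw [PySem.List.mem_enumerate_iff] at hp hq
    obtain ⟨i, hi, rfl⟩ := hp
    obtain ⟨j, hj, rfl⟩ := hq
    simp only [Int.zero_add, Prod.mk.injEq] at hx h1 hj ⊢
    obtain ⟨hxr, hxc⟩ := hx
    have hib : 0 ≤ (k : Int) - offr ∧ (k : Int) - offr < PySem.List.len block := by
      simp only [PySem.List.len_eq]; omega
    rw [if_pos hib]
    have hbi : PySem.List.pyGetD block ((k : Int) - offr) [] = block[i] := by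
      have : ((k : Int) - offr) = (i : Int) := by omega
      rw [this, PySem.List.pyGetD_eq_getElem _ _ (by positivity) (by simpa [PySem.List.len_eq] using (by exact_mod_cast hi : (i : Int) < block.length))]
      simp
    rw [hbi]
    refine ⟨by omega, by omega, by simp only [PySem.List.len_eq]; omega, ?_⟩
    have hji : ((c : Int) - offc) = (j : Int) := by omega
    rw [hji, PySem.List.pyGetD_eq_getElem _ _ (by positivity) (by simpa [PySem.List.len_eq] using (by exact_mod_cast hj : (j : Int) < block[i].length))]
    simpa using h1
  · intro h
    by_cases hib : 0 ≤ (k : Int) - offr ∧ (k : Int) - offr < PySem.List.len block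
    · rw [if_pos hib] at h
      obtain ⟨hcw, hc0, hclen, hcell⟩ := h
      simp only [PySem.List.len_eq] at hib
      set i : Nat := ((k : Int) - offr).toNat with hi_def
      have hik : ((k : Int) - offr) = (i : Int) := by omega
      have hi : i < block.length := by omega
      have hbi : PySem.List.pyGetD block ((k : Int) - offr) [] = block[i] := by
        rw [hik, PySem.List.pyGetD_eq_getElem _ _ (by positivity) (by simp; omega)]
        simp
      rw [hbi] at hclen hcell
      simp only [PySem.List.len_eq] at hclen
      set j : Nat := ((c : Int) - offc).toNat with hj_def
      have hjc : ((c : Int) - offc) = (j : Int) := by omega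
      have hj : j < block[i].length := by omega
      rw [hjc, PySem.List.pyGetD_eq_getElem _ _ (by positivity) (by simp; omega)] at hcell
      simp only [Int.toNat_natCast] at hcell
      refine ⟨((i : Int), block[i]), ?_, ((j : Int), block[i][j]), ?_, ?_, ?_, ?_, ?_, ?_, ?_⟩
      · rw [PySem.List.mem_enumerate_iff]; exact ⟨i, hi, by simp⟩
      · rw [PySem.List.mem_enumerate_iff]; exact ⟨j, hj, by simp⟩
      · simpa using hcell
      · omega
      · omega
      · omega
      · omega
      · simp only [Prod.mk.injEq]; constructor <;> omega
    · rw [if_neg hib] at h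
      simp only [PySem.List.len_eq, List.length_nil] at h
      omega

theorem overlay_block_on_grid_with_pivot_spec : Claim_equal_overlay_block_on_grid_with_pivot := by
  intro base_grid block block_pivot target_pivot _ _
  show overlay_block_on_grid_with_pivot base_grid block block_pivot target_pivot
      = overlay_block_on_grid_with_pivot_alt base_grid block block_pivot target_pivot
  unfold overlay_block_on_grid_with_pivot overlay_block_on_grid_with_pivot_alt
  have hstart : base_grid.map (fun row => row) = pvRebuild base_grid PySem.Set.empty := by
    rw [pvRebuild_empty]; exact List.map_id' base_grid
  rw [hstart, pvOuter base_grid (target_pivot.1 - block_pivot.1) (target_pivot.2 - block_pivot.2)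
    (PySem.List.enumerate block 0) PySem.Set.empty, pvAltRows]
  set offr := target_pivot.1 - block_pivot.1
  set offc := target_pivot.2 - block_pivot.2
  set n := PySem.List.len base_grid with hn
  set w := (if base_grid ≠ [] then PySem.List.len (base_grid.headD []) else 0) with hw
  set S := (PySem.List.enumerate block 0).foldl (fun s p =>
      (PySem.List.enumerate p.2 0).foldl (fun s q =>
        if q.2 = 1 then
          if 0 ≤ offr + p.1 ∧ offr + p.1 < n ∧ 0 ≤ offc + q.1 ∧ offc + q.1 < w then
            PySem.Set.add s (offr + p.1, offc + q.1)
          else s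
        else s) s) PySem.Set.empty with hS
  apply List.ext_getElem?
  intro k
  rw [pvRebuild_getElem?]
  rw [List.getElem?_map, PySem.List.getElem?_enumerate]
  cases hrow : base_grid[k]? with
  | none => rfl
  | some row =>
    simp only [Option.map_some]
    congr 1
    have hk : (k : Int) < n := by
      rw [hn, PySem.List.len_eq]
      exact_mod_cast List.getElem?_eq_some_iff.mp hrow |>.choose
    apply List.ext_getElem?
    intro cN
    rw [pvMarkRow_getElem?, List.getElem?_map, PySem.List.getElem?_enumerate]
    cases hcell : row[cN]? with
    | none => rfl
    | some v =>
      simp only [Option.map_some, Int.zero_add]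
      have hmem := pvGatherEqMem block offr offc n w k cN hk
      by_cases hin : ((k : Int), (cN : Int)) ∈ S
      · rw [if_pos ((PySem.Set.contains_iff _ _).mpr hin), if_pos (hmem.mp hin)]
      · rw [if_neg (fun hc => hin ((PySem.Set.contains_iff _ _).mp hc)),
          if_neg (fun hc => hin (hmem.mpr hc))]
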